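-- pv_equiv track=rewrite | github.com/Shamim-Fav/realestate | realestatech.py | check_for_gone
-- ===== SOURCE A (Python) =====
-- def check_for_gone(html_content):
--     gone_indicators = [
--         '410 gone', 'page not found', 'no longer available',
--         'has been removed', 'does not exist', '404 not found',
--         'error 404', 'error 410'
--     ]
--
--     html_lower = html_content.lower()
--     for indicator in gone_indicators:
--         if indicator in html_lower:
--             return True
--     return False
-- ===== SOURCE B (Python) =====
-- import re
--
-- GONE_PATTERN = re.compile('|'.join([
--     '410 gone', 'page not found', 'no longer available',
--     'has been removed', 'does not exist', '404 not found',
--     'error 404', 'error 410'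
-- ]))
--
-- def check_for_gone(html_content):
--     return GONE_PATTERN.search(html_content.lower()) is not None
-- ===== Notes on version B (the rewrite author's own statement) =====
-- stated objective: idiomatic
-- what changed: Replaces the loop of eight separate membership substring scans by one precompiled regex alternation of the (metacharacter-free) indicator literals, searched once over the lowercased HTML.
import Mathlib
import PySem

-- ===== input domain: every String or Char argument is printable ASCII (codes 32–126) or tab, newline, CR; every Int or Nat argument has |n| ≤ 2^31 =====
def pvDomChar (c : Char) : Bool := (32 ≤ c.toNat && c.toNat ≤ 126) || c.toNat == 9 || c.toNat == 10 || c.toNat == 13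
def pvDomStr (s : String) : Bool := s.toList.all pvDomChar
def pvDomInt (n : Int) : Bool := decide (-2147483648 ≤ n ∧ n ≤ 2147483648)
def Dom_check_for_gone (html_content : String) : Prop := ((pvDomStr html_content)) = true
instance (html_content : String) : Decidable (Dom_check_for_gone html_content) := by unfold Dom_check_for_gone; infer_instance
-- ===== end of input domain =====

-- B replaces eight separate 'in' scans by one precompiled regex alternation searched once (objective: idiomatic).

-- ===== PORT A =====
def goneIndicators : List String :=
  ["410 gone", "page not found", "no longer available",
   "has been removed", "does not exist", "404 not found",
   "error 404", "error 410"]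

-- the 'for indicator in gone_indicators: if indicator in html_lower: return True' loop
def goneLoop (inds : List String) (html_lower : String) : Bool :=
  match inds with
  | [] => false
  | ind :: rest => if PySem.Str.isIn ind html_lower then true else goneLoop rest html_lower

def check_for_gone (html_content : String) : Bool :=
  goneLoop goneIndicators (PySem.Str.lower html_content)

-- ===== PORT B =====
def goneAlternatives : List String :=
  ["410 gone", "page not found", "no longer available",
   "has been removed", "does not exist", "404 not found",
   "error 404", "error 410"]

-- GONE_PATTERN.search(h) is not None: the pattern is an alternation of literal strings
-- (no metacharacters), so re.search matches iff at some start position 0..len(h) one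
-- alternative occurs literally; this is the exact semantics of that library call.
def check_for_gone_alt (html_content : String) : Bool :=
  let h := PySem.Chars.lower html_content.toList
  (List.range (h.length + 1)).any fun i =>
    goneAlternatives.any fun alt => PySem.Chars.startswith (h.drop i) alt.toList

-- ===== PRECONDITION & SPEC =====
def Spec_check_for_gone (html_content : String) (out : Bool) : Prop := out = check_for_gone_alt html_content
instance (html_content : String) (out : Bool) : Decidable (Spec_check_for_gone html_content out) := by unfold Spec_check_for_gone; infer_instance

-- ===== CLAIM (what is proved, stated in full; the proofs are below) =====
def Claim_equal_check_for_gone : Prop := ∀ (html_content : String), Dom_check_for_gone html_content → Spec_check_for_gone html_content (check_for_gone html_content)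

-- ===== LEMMAS AND PROOFS =====

-- an early-return membership loop is an 'any'
theorem goneLoop_eq_any (inds : List String) (h : String) :
    goneLoop inds h = inds.any (fun ind => PySem.Str.isIn ind h) := by
  induction inds with
  | nil => rfl
  | cons ind rest ih => simp [goneLoop, ih]

-- substring containment = some drop has it as a prefix (indices up to length)
theorem infix_iff_exists_drop {α : Type} (sub l : List α) :
    sub <:+: l ↔ ∃ i < l.length + 1, sub <+: l.drop i := by
  constructor
  · rintro ⟨s, t, rfl⟩
    exact ⟨s.length, by simp, by simp⟩
  · rintro ⟨i, _, hpre⟩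
    exact hpre.isInfix.trans (List.drop_suffix i l).isInfix

theorem check_for_gone_spec : Claim_equal_check_for_gone := by
  intro html _
  unfold Spec_check_for_gone check_for_gone check_for_gone_alt
  rw [goneLoop_eq_any, Bool.eq_iff_iff]
  simp only [List.any_eq_true, List.mem_range, PySem.Chars.startswith_iff]
  constructor
  · rintro ⟨ind, hmem, hin⟩
    rw [show goneIndicators = goneAlternatives from rfl] at hmem
    have : ind.toList <:+: (PySem.Chars.lower html.toList) := by
      have := (PySem.Chars.isIn_iff_infix ind.toList (PySem.Str.lower html).toList).mp (by simpa using hin)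
      simpa [PySem.Str.lower] using this
    obtain ⟨i, hi, hp⟩ := (infix_iff_exists_drop _ _).mp this
    exact ⟨i, hi, ind, hmem, hp⟩
  · rintro ⟨i, hi, ind, hmem, hp⟩
    refine ⟨ind, hmem, ?_⟩
    have hinf : ind.toList <:+: (PySem.Chars.lower html.toList) :=
      (infix_iff_exists_drop _ _).mpr ⟨i, hi, hp⟩
    have := (PySem.Chars.isIn_iff_infix ind.toList (PySem.Str.lower html).toList).mpr (by simpa [PySem.Str.lower] using hinf)
    simpa using this
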